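-- pv_equiv track=rewrite | github.com/MacielRojas/Parcial2-SmartSales365 | backend/app_api/infraestructure/services/regular_expression/re_service.py | extraer_distinct
-- ===== SOURCE A (Python) =====
-- def extraer_distinct(texto: str) -> bool:
--     """ Detecta si se requiere DISTINCT """
--     try:
--         texto_lower = texto.lower()
--
--         keywords_distinct = [
--             'unicos',
--             'unicas',
--             'distintos',
--             'distintas',
--             'diferentes',
--             'sin repetir',
--             'sin duplicados',
--             'distinct',
--         ]
--
--         return any(keyword in texto_lower for keyword in keywords_distinct)
--     except Exception as e:
--         return False
-- ===== SOURCE B (Python) =====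
-- _KEYWORDS = ('unicos', 'unicas', 'distintos', 'distintas',
--              'diferentes', 'sin repetir', 'sin duplicados', 'distinct')
--
-- def extraer_distinct(texto: str) -> bool:
--     """Detecta si se requiere DISTINCT (single left-to-right scan)."""
--     try:
--         t = texto.lower()
--         for i in range(len(t)):
--             for k in _KEYWORDS:
--                 if t.startswith(k, i):
--                     return True
--         return False
--     except Exception:
--         return False
-- ===== Notes on version B (the rewrite author's own statement) =====
-- stated objective: alternative
-- what changed: Replaces the keyword-major loop (one full substring search per keyword) by a single position-major scan of the lowered text that tests all keywords as prefixes at each position.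
import Mathlib
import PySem

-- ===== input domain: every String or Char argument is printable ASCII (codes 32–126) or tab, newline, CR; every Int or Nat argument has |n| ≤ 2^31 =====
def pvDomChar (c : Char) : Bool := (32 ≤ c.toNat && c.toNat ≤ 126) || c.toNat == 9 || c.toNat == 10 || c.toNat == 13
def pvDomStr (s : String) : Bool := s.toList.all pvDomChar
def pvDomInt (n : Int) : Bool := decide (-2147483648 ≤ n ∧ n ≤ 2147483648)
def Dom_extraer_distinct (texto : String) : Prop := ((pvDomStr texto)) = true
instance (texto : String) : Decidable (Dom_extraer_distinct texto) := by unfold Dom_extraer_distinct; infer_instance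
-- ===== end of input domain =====

-- B replaces A's keyword-major loop (one substring search per keyword) by a single
-- position-major scan testing all keywords as prefixes at each position (objective: alternative).

-- ===== PORT A =====
def extraer_distinct (texto : String) : Bool :=
  let texto_lower := PySem.Str.lower texto
  let keywords_distinct : List String :=
    ["unicos", "unicas", "distintos", "distintas",
     "diferentes", "sin repetir", "sin duplicados", "distinct"]
  keywords_distinct.any (fun keyword => PySem.Str.isIn keyword texto_lower)

-- ===== PORT B =====
def pvKwB : List (List Char) :=
  (["unicos", "unicas", "distintos", "distintas",
    "diferentes", "sin repetir", "sin duplicados", "distinct"]).map String.toList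

-- the position-major scan: at each suffix, test every keyword as a prefix
def pvScan (kws : List (List Char)) : List Char → Bool
  | [] => false
  | c :: t => (kws.any fun k => k.isPrefixOf (c :: t)) || pvScan kws t

def extraer_distinct_alt (texto : String) : Bool :=
  pvScan pvKwB (PySem.Str.lower texto).toList

-- ===== PRECONDITION & SPEC =====
def Spec_extraer_distinct (texto : String) (out : Bool) : Prop := out = extraer_distinct_alt texto
instance (texto : String) (out : Bool) : Decidable (Spec_extraer_distinct texto out) := by unfold Spec_extraer_distinct; infer_instance

-- ===== CLAIM (what is proved, stated in full; the proofs are below) =====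
def Claim_equal_extraer_distinct : Prop := ∀ (texto : String), Dom_extraer_distinct texto → Spec_extraer_distinct texto (extraer_distinct texto)

-- ===== LEMMAS AND PROOFS =====
theorem pvScan_iff (kws : List (List Char)) (h : ∀ k ∈ kws, k ≠ [])
    (cs : List Char) : pvScan kws cs = true ↔ ∃ k ∈ kws, k <:+: cs := by
  induction cs with
  | nil =>
      simp only [pvScan]
      constructor
      · intro hfalse; exact (Bool.false_ne_true hfalse).elim
      · rintro ⟨k, hk, hinf⟩
        exact (h k hk (List.infix_nil.mp hinf)).elim
  | cons c t ih =>
      simp only [pvScan, Bool.or_eq_true, List.any_eq_true, ih,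
        List.isPrefixOf_iff_prefix, List.infix_cons_iff]
      constructor
      · rintro (⟨k, hk, hp⟩ | ⟨k, hk, hi⟩)
        · exact ⟨k, hk, Or.inl hp⟩
        · exact ⟨k, hk, Or.inr hi⟩
      · rintro ⟨k, hk, hp | hi⟩
        · exact Or.inl ⟨k, hk, hp⟩
        · exact Or.inr ⟨k, hk, hi⟩

theorem extraer_eq (texto : String) : extraer_distinct texto = extraer_distinct_alt texto := by
  unfold extraer_distinct extraer_distinct_alt
  rw [Bool.eq_iff_iff]
  rw [pvScan_iff pvKwB (by decide)]
  simp only [List.any_eq_true, PySem.Str.isIn_iff_infix, pvKwB, List.mem_map]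
  constructor
  · rintro ⟨k, hk, hinf⟩
    exact ⟨k.toList, ⟨k, hk, rfl⟩, hinf⟩
  · rintro ⟨k, ⟨s, hs, rfl⟩, hinf⟩
    exact ⟨s, hs, hinf⟩

-- ===== VERDICT (by name: the statement is the Claim_ definition above) =====
theorem extraer_distinct_spec : Claim_equal_extraer_distinct := by
  intro texto _
  exact extraer_eq texto
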